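-- pv_equiv track=rewrite | github.com/Arban19/rendezvousWithCassidoo | word_length_product.py | word_length_product
-- ===== SOURCE A (Python) =====
-- def word_length_product(words):
--     products = [0]
--     for index, word in enumerate(words):
--         char_set = set(word)
--         succeeding_words = words[index:]
--         for other_word in succeeding_words:
--             if not char_set.intersection(set(other_word)):
--                 products.append(len(word)*len(other_word))
--     return max(products)
-- ===== SOURCE B (Python) =====
-- def word_length_product(words):
--     def mask(w):
--         m = 0
--         for c in w:
--             m |= 1 << ord(c)
--         return m
--     data = sorted(((len(w), mask(w)) for w in words), key=lambda p: p[0], reverse=True)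
--     best = 0
--     for i, (li, mi) in enumerate(data):
--         for lj, mj in data[i + 1:]:
--             if mi & mj == 0:
--                 # lengths are non-increasing, so the FIRST disjoint later word
--                 # maximizes li*lj for this i: stop scanning immediately.
--                 best = max(best, li * lj)
--                 break
--     return best
-- ===== Notes on version B (the rewrite author's own statement) =====
-- stated objective: faster
-- what changed: B precomputes one character bitmask per word, sorts the (length, mask) pairs by length descending, and for each word stops at the FIRST disjoint later word (which already maximizes the product for that word), instead of A's full pairwise scan that rebuilds and intersects character sets for every (self-included) pair.
import Mathlib
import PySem

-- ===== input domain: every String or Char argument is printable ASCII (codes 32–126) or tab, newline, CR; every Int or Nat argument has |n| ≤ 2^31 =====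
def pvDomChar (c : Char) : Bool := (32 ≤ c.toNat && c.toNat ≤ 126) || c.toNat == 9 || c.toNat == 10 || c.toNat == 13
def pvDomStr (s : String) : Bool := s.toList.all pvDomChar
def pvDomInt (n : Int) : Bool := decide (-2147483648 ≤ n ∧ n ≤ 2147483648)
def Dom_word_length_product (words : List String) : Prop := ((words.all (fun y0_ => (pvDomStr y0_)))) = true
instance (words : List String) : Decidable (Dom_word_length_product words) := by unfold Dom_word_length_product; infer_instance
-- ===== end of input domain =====

-- B precomputes one character bitmask per word, sorts (length, mask) pairs by length
-- descending and stops the inner scan at the first disjoint later word (which already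
-- maximizes the product for that word), instead of A's full pairwise set-intersection scan.

-- ===== PORT A =====
def word_length_product (words : List String) : Int :=
  -- max(products): products begins with 0, so it is never empty and Python's max cannot raise
  (PySem.List.max?
    ((PySem.List.enumerate words).foldl
      (fun acc iw =>
        (PySem.List.slice words (some iw.1) none).foldl
          (fun acc2 other =>
            if (PySem.Set.inter (PySem.Set.ofList iw.2.toList) (PySem.Set.ofList other.toList)).isEmpty
            then acc2 ++ [PySem.Str.len iw.2 * PySem.Str.len other]
            else acc2)
          acc)
      [0])
    (fun x => x)).getD 0

-- ===== PORT B =====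
def wlpMask (cs : List Char) : Nat :=
  cs.foldl (fun m c => m ||| (1 <<< c.toNat)) 0

-- the inner 'for … if … break' loop: stop at the first disjoint partner
def wlpInner (li : Int) (mi : Nat) : List (Int × Nat) → Int → Int
  | [], best => best
  | (lj, mj) :: t, best => if mi &&& mj = 0 then max best (li * lj) else wlpInner li mi t best

def wlpScan : List (Int × Nat) → Int → Int
  | [], best => best
  | (li, mi) :: t, best => wlpScan t (wlpInner li mi t best)

def word_length_product_alt (words : List String) : Int :=
  wlpScan
    (PySem.List.sorted (words.map (fun w => (PySem.Str.len w, wlpMask w.toList)))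
      (fun p => p.1) true)
    0

-- ===== PRECONDITION & SPEC =====
def Spec_word_length_product (words : List String) (out : Int) : Prop := out = word_length_product_alt words
instance (words : List String) (out : Int) : Decidable (Spec_word_length_product words out) := by unfold Spec_word_length_product; infer_instance

-- ===== CLAIM (what is proved, stated in full; the proofs are below) =====
def Claim_equal_word_length_product : Prop := ∀ (words : List String), Dom_word_length_product words → Spec_word_length_product words (word_length_product words)

-- ===== LEMMAS AND PROOFS =====

-- the pair test both programs implement: the two words share no character
def wlpDisj (w o : String) : Bool := w.toList.all (fun c => !(o.toList.contains c))

-- the list of candidate products A appends, one tail segment per word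
def wlpProds : List String → List Int
  | [] => []
  | w :: t => ((w :: t).filter (fun o => wlpDisj w o)).map
                (fun o => PySem.Str.len w * PySem.Str.len o) ++ wlpProds t

-- the product a pair of (length, mask) records contributes (0 when not disjoint)
def wlpH (p q : Int × Nat) : Int := if p.2 &&& q.2 = 0 then p.1 * q.1 else 0

-- all pair contributions, one tail segment per record (self pair included)
def wlpPairs : List (Int × Nat) → List Int
  | [] => []
  | p :: t => (p :: t).map (wlpH p) ++ wlpPairs t

lemma wlpMask_testBit (cs : List Char) (i : Nat) :
    (wlpMask cs).testBit i = cs.any (fun c => c.toNat == i) := by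
  suffices h : ∀ m : Nat, (cs.foldl (fun m c => m ||| (1 <<< c.toNat)) m).testBit i
      = (m.testBit i || cs.any (fun c => c.toNat == i)) by
    simpa [wlpMask] using h 0
  induction cs with
  | nil => simp
  | cons c t ih =>
      intro m
      simp only [List.foldl_cons, ih, List.any_cons]
      rw [Nat.testBit_or, Nat.one_shiftLeft, Nat.testBit_two_pow]
      by_cases h : c.toNat = i
      · simp [h]
      · have hf : (c.toNat == i) = false := by simp [h]
        rw [decide_eq_false h, hf, Bool.false_or, Bool.or_false]

lemma wlpMask_disjoint (a b : List Char) :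
    (wlpMask a &&& wlpMask b = 0) ↔ ∀ c ∈ a, c ∉ b := by
  constructor
  · intro h c hca hcb
    have hb : (wlpMask a &&& wlpMask b).testBit c.toNat = false := by
      rw [h]; exact Nat.zero_testBit _
    rw [Nat.testBit_and, wlpMask_testBit, wlpMask_testBit] at hb
    have ha' : a.any (fun x => x.toNat == c.toNat) = true :=
      List.any_eq_true.mpr ⟨c, hca, by simp⟩
    have hb' : b.any (fun x => x.toNat == c.toNat) = true :=
      List.any_eq_true.mpr ⟨c, hcb, by simp⟩
    rw [ha', hb'] at hb
    exact Bool.noConfusion hb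
  · intro h
    apply Nat.eq_of_testBit_eq
    intro i
    rw [Nat.testBit_and, wlpMask_testBit, wlpMask_testBit, Nat.zero_testBit]
    by_cases ha : a.any (fun c => c.toNat == i) = true
    · obtain ⟨c, hc, hci⟩ := List.any_eq_true.mp ha
      have hnb : ∀ d ∈ b, ¬ d.toNat = i := by
        intro d hd hdi
        have hdc : d = c := by
          apply Char.ext
          apply UInt32.toNat_inj.mp
          have hci' : c.toNat = i := by simpa using hci
          show d.toNat = c.toNat
          omega
        exact h c hc (hdc ▸ hd)
      have hb : b.any (fun c => c.toNat == i) = false := by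
        simp only [List.any_eq_false]; intro d hd; simpa using hnb d hd
      simp [ha, hb]
    · simp [Bool.eq_false_iff.mpr ha]

-- A's pair test equals the shared character-disjointness test
lemma wlp_cond_A (w o : String) :
    (PySem.Set.inter (PySem.Set.ofList w.toList) (PySem.Set.ofList o.toList)).isEmpty
      = wlpDisj w o := by
  apply Bool.coe_iff_coe.mp
  rw [List.isEmpty_iff, List.eq_nil_iff_forall_not_mem]
  constructor
  · intro h
    simp only [wlpDisj, List.all_eq_true]
    intro c hc
    by_contra hcb
    exact h c ((PySem.Set.mem_inter _ _ _).mpr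
      ⟨by simpa [PySem.Set.mem_ofList] using hc,
       by simp [PySem.Set.mem_ofList]; simpa using hcb⟩)
  · intro h c hc
    have hm := (PySem.Set.mem_inter _ _ _).mp hc
    have h1 : c ∈ w.toList := by simpa [PySem.Set.mem_ofList] using hm.1
    have h2 : c ∈ o.toList := by simpa [PySem.Set.mem_ofList] using hm.2
    simp only [wlpDisj, List.all_eq_true] at h
    exact absurd h2 (by simpa using h c h1)

-- B's pair test equals the same
lemma wlp_cond_B (w o : String) :
    (wlpMask w.toList &&& wlpMask o.toList = 0) ↔ wlpDisj w o = true := by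
  rw [wlpMask_disjoint]
  simp [wlpDisj]

lemma wlpDisj_iff (w o : String) : wlpDisj w o = true ↔ ∀ c ∈ w.toList, c ∉ o.toList := by
  simp [wlpDisj]

lemma wlpDisj_symm (w o : String) : wlpDisj w o = wlpDisj o w := by
  apply Bool.coe_iff_coe.mp
  rw [wlpDisj_iff, wlpDisj_iff]
  exact ⟨fun h c hc hcw => h c hcw hc, fun h c hc hcw => h c hcw hc⟩

lemma wlpMask_eq_zero (cs : List Char) (h : wlpMask cs = 0) : cs = [] := by
  cases cs with
  | nil => rfl
  | cons c t =>
      exfalso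
      have := wlpMask_testBit (c :: t) c.toNat
      rw [h, Nat.zero_testBit] at this
      simp at this

lemma wlpH_symm (p q : Int × Nat) : wlpH p q = wlpH q p := by
  simp [wlpH, Nat.and_comm, mul_comm]

-- A's enumerate-and-slice loop builds exactly acc ++ wlpProds
lemma wlp_A_fold (words : List String) :
    ∀ (suffix : List String) (k : Nat) (acc : List Int), words.drop k = suffix →
      (PySem.List.enumerate suffix (k : Int)).foldl
        (fun acc iw =>
          (PySem.List.slice words (some iw.1) none).foldl
            (fun acc2 other =>
              if (PySem.Set.inter (PySem.Set.ofList iw.2.toList) (PySem.Set.ofList other.toList)).isEmpty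
              then acc2 ++ [PySem.Str.len iw.2 * PySem.Str.len other]
              else acc2)
            acc)
        acc
      = acc ++ wlpProds suffix := by
  intro suffix
  induction suffix with
  | nil => intro k acc _; simp [PySem.List.enumerate_nil, wlpProds]
  | cons w t ih =>
      intro k acc h
      rw [PySem.List.enumerate_cons, List.foldl_cons]
      have hdrop : words.drop (k + 1) = t := by
        have h2 := congrArg List.tail h
        rw [List.tail_drop] at h2
        simpa using h2
      have hcast : (k : Int) + 1 = ((k + 1 : Nat) : Int) := by push_cast; ring
      rw [hcast, ih (k + 1) _ hdrop]
      have hslice : PySem.List.slice words (some (k : Int)) none = w :: t := by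
        rw [PySem.List.slice_from_natCast, h]
      rw [hslice]
      have hfun : (fun (acc2 : List Int) other =>
          if (PySem.Set.inter (PySem.Set.ofList w.toList) (PySem.Set.ofList other.toList)).isEmpty
          then acc2 ++ [PySem.Str.len w * PySem.Str.len other] else acc2)
          = (fun acc2 other => if wlpDisj w other
              then acc2 ++ [PySem.Str.len w * PySem.Str.len other] else acc2) := by
        funext acc2 other; rw [wlp_cond_A]
      rw [hfun, PySem.List.foldl_append_if (fun o => wlpDisj w o)
            (fun o => PySem.Str.len w * PySem.Str.len o)]
      rw [wlpProds, List.append_assoc]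

lemma wlp_A_eq (words : List String) :
    word_length_product words = (wlpProds words).foldl max 0 := by
  unfold word_length_product
  have h := wlp_A_fold words words 0 [0] (by simp)
  simp only [Nat.cast_zero] at h
  rw [h, show ([0] ++ wlpProds words : List Int) = 0 :: wlpProds words from rfl,
      PySem.List.max?_id_cons]
  rfl

-- running-max toolbox
lemma wlp_foldl_max_le (L : List Int) (b c : Int) (hb : b ≤ c) (h : ∀ x ∈ L, x ≤ c) :
    L.foldl max b ≤ c := by
  induction L generalizing b with
  | nil => exact hb
  | cons x t ih =>
      exact ih (max b x) (max_le hb (h x List.mem_cons_self))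
        (fun y hy => h y (List.mem_cons_of_mem _ hy))

lemma wlp_foldl_max_eq_self (L : List Int) (c : Int) (h : ∀ x ∈ L, x ≤ c) :
    L.foldl max c = c := by
  induction L with
  | nil => rfl
  | cons x t ih =>
      simp only [List.foldl_cons, max_eq_left (h x (by simp))]
      exact ih (fun y hy => h y (by simp [hy]))

-- membership characterization of A's candidate list
lemma wlp_mem_prods {x : Int} {l : List String} (h : x ∈ wlpProds l) :
    ∃ w ∈ l, ∃ o ∈ l, wlpDisj w o = true ∧ x = PySem.Str.len w * PySem.Str.len o := by
  induction l with
  | nil => simp [wlpProds] at h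
  | cons w t ih =>
      rw [wlpProds, List.mem_append] at h
      rcases h with h | h
      · obtain ⟨o, ho, hx⟩ := List.mem_map.mp h
        have := List.mem_filter.mp ho
        exact ⟨w, by simp, o, this.1, this.2, hx.symm⟩
      · obtain ⟨w', hw', o', ho', hd, hx⟩ := ih h
        exact ⟨w', by simp [hw'], o', by simp [ho'], hd, hx⟩

lemma wlp_prods_mem {w o : String} {l : List String}
    (hw : w ∈ l) (ho : o ∈ l) (hd : wlpDisj w o = true) :
    PySem.Str.len w * PySem.Str.len o ∈ wlpProds l := by
  induction l with
  | nil => simp at hw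
  | cons a t ih =>
      rw [wlpProds, List.mem_append]
      rcases List.mem_cons.mp hw with hwa | hwt
      · subst hwa
        exact Or.inl (List.mem_map.mpr ⟨o, List.mem_filter.mpr ⟨ho, hd⟩, rfl⟩)
      · rcases List.mem_cons.mp ho with hoa | hot
        · subst hoa
          refine Or.inl (List.mem_map.mpr ⟨w, List.mem_filter.mpr ⟨by simp [hwt], ?_⟩, ?_⟩)
          · rw [← wlpDisj_symm]; exact hd
          · rw [mul_comm]
        · exact Or.inr (ih hwt hot)

-- membership characterization of the pair-contribution list
lemma wlp_mem_pairs {x : Int} {l : List (Int × Nat)} (h : x ∈ wlpPairs l) :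
    ∃ p ∈ l, ∃ q ∈ l, x = wlpH p q := by
  induction l with
  | nil => simp [wlpPairs] at h
  | cons p t ih =>
      rw [wlpPairs, List.mem_append] at h
      rcases h with h | h
      · obtain ⟨q, hq, hx⟩ := List.mem_map.mp h
        exact ⟨p, by simp, q, hq, hx.symm⟩
      · obtain ⟨p', hp', q', hq', hx⟩ := ih h
        exact ⟨p', by simp [hp'], q', by simp [hq'], hx⟩

lemma wlp_pairs_mem {p q : Int × Nat} {l : List (Int × Nat)}
    (hp : p ∈ l) (hq : q ∈ l) : wlpH p q ∈ wlpPairs l := by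
  induction l with
  | nil => simp at hp
  | cons a t ih =>
      rw [wlpPairs, List.mem_append]
      rcases List.mem_cons.mp hp with hpa | hpt
      · subst hpa
        exact Or.inl (List.mem_map.mpr ⟨q, hq, rfl⟩)
      · rcases List.mem_cons.mp hq with hqa | hqt
        · subst hqa
          exact Or.inl (List.mem_map.mpr ⟨p, by simp [hpt], (wlpH_symm p q).symm ▸ (wlpH_symm q p) ▸ rfl⟩)
        · exact Or.inr (ih hpt hqt)

-- the record B builds for a word
def wlpRec (w : String) : Int × Nat := (PySem.Str.len w, wlpMask w.toList)

lemma wlpH_rec (w o : String) :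
    wlpH (wlpRec w) (wlpRec o)
      = if wlpDisj w o then PySem.Str.len w * PySem.Str.len o else 0 := by
  by_cases h : wlpDisj w o = true
  · simp only [wlpH, wlpRec]
    rw [if_pos ((wlp_cond_B w o).mpr h), if_pos h]
  · simp only [wlpH, wlpRec]
    rw [if_neg (fun hh => h ((wlp_cond_B w o).mp hh)), if_neg h]

lemma wlp_len_nonneg (w : String) : 0 ≤ PySem.Str.len w := by
  rw [PySem.Str.len_eq]; positivity

-- max-over-candidates is the same through A's string view and B's record view
lemma wlp_m0_eq (words : List String) (l : List (Int × Nat))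
    (hmem : ∀ p, p ∈ l ↔ p ∈ words.map wlpRec) :
    (wlpProds words).foldl max 0 = (wlpPairs l).foldl max 0 := by
  have h0l : (0 : Int) ≤ (wlpProds words).foldl max 0 := (PySem.List.le_foldl_max _ 0).1
  have h0r : (0 : Int) ≤ (wlpPairs l).foldl max 0 := (PySem.List.le_foldl_max _ 0).1
  apply le_antisymm
  · apply wlp_foldl_max_le _ _ _ h0r
    intro x hx
    obtain ⟨w, hw, o, ho, hd, hxeq⟩ := wlp_mem_prods hx
    have hxp : x = wlpH (wlpRec w) (wlpRec o) := by rw [wlpH_rec, if_pos hd, hxeq]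
    have hmemx : x ∈ wlpPairs l := by
      rw [hxp]
      exact wlp_pairs_mem ((hmem _).mpr (List.mem_map.mpr ⟨w, hw, rfl⟩))
        ((hmem _).mpr (List.mem_map.mpr ⟨o, ho, rfl⟩))
    exact (PySem.List.le_foldl_max _ 0).2 x hmemx
  · apply wlp_foldl_max_le _ _ _ h0l
    intro x hx
    obtain ⟨p, hp, q, hq, hxeq⟩ := wlp_mem_pairs hx
    obtain ⟨w, hw, hpw⟩ := List.mem_map.mp ((hmem _).mp hp)
    obtain ⟨o, ho, hqo⟩ := List.mem_map.mp ((hmem _).mp hq)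
    subst hpw; subst hqo
    rw [wlpH_rec] at hxeq
    by_cases hd : wlpDisj w o = true
    · rw [if_pos hd] at hxeq
      exact hxeq ▸ (PySem.List.le_foldl_max _ 0).2 _ (wlp_prods_mem hw ho hd)
    · rw [if_neg hd] at hxeq
      exact hxeq ▸ h0l
  
-- B's inner loop: with lengths non-increasing, the first disjoint partner is the max
lemma wlp_inner_eq (li : Int) (mi : Nat) (t : List (Int × Nat)) (best : Int)
    (hli : 0 ≤ li) (hb : 0 ≤ best)
    (hnn : ∀ q ∈ t, 0 ≤ q.1)
    (hdesc : t.Pairwise (fun a b => b.1 ≤ a.1)) :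
    wlpInner li mi t best = (t.map (wlpH (li, mi))).foldl max best := by
  induction t generalizing best with
  | nil => rfl
  | cons q t' ih =>
      obtain ⟨lj, mj⟩ := q
      rw [List.pairwise_cons] at hdesc
      simp only [List.map_cons, List.foldl_cons, wlpInner]
      by_cases h : mi &&& mj = 0
      · rw [if_pos h]
        have hHq : wlpH (li, mi) (lj, mj) = li * lj := by rw [wlpH, if_pos h]
        rw [hHq]
        symm
        apply wlp_foldl_max_eq_self
        intro x hx
        obtain ⟨q', hq', hxq⟩ := List.mem_map.mp hx
        have hlj' : q'.1 ≤ lj := hdesc.1 q' hq'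
        have hq'nn : 0 ≤ q'.1 := hnn q' (by simp [hq'])
        have hle : li * q'.1 ≤ li * lj := mul_le_mul_of_nonneg_left hlj' hli
        rw [← hxq, wlpH]
        split
        · exact le_max_of_le_right hle
        · exact le_max_of_le_right (mul_nonneg hli (hq'nn.trans hlj'))
      · rw [if_neg h]
        have hHq : wlpH (li, mi) (lj, mj) = 0 := by rw [wlpH, if_neg h]
        rw [hHq, max_eq_left hb]
        exact ih best hb (fun q hq => hnn q (by simp [hq])) hdesc.2

-- B's scan computes the running max of all pair contributions
lemma wlp_scan_eq (l : List (Int × Nat)) (best : Int) (hb : 0 ≤ best)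
    (hnn : ∀ p ∈ l, 0 ≤ p.1)
    (hz : ∀ p ∈ l, p.2 = 0 → p.1 = 0)
    (hdesc : l.Pairwise (fun a b => b.1 ≤ a.1)) :
    wlpScan l best = (wlpPairs l).foldl max best := by
  induction l generalizing best with
  | nil => rfl
  | cons p t ih =>
      obtain ⟨li, mi⟩ := p
      rw [List.pairwise_cons] at hdesc
      have hli : 0 ≤ li := hnn (li, mi) (by simp)
      -- the self pair contributes 0
      have hself : wlpH (li, mi) (li, mi) = 0 := by
        rw [wlpH, Nat.and_self]
        split
        · have : li = 0 := hz (li, mi) (by simp) (by assumption)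
          rw [this, mul_zero]
        · rfl
      rw [wlpScan, wlpPairs, List.foldl_append, List.map_cons, List.foldl_cons,
          hself, max_eq_left hb,
          wlp_inner_eq li mi t best hli hb (fun q hq => hnn q (by simp [hq])) hdesc.2]
      exact ih _ ((PySem.List.le_foldl_max _ best).1.trans' hb)
        (fun q hq => hnn q (by simp [hq])) (fun q hq => hz q (by simp [hq])) hdesc.2

-- ===== VERDICT (by name: the statement is the Claim_ definition above) =====
theorem word_length_product_spec : Claim_equal_word_length_product := by
  intro words _
  show word_length_product words = word_length_product_alt words
  have hdata : words.map (fun w => (PySem.Str.len w, wlpMask w.toList)) = words.map wlpRec := rfl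
  rw [wlp_A_eq, word_length_product_alt, hdata]
  set s := PySem.List.sorted (words.map wlpRec) (fun p => p.1) true with hs
  have hperm : s.Perm (words.map wlpRec) := by
    rw [hs]
    exact PySem.List.sorted_perm _ _ _
  have hmem : ∀ p, p ∈ s ↔ p ∈ words.map wlpRec := fun p => hperm.mem_iff
  have hnn : ∀ p ∈ s, 0 ≤ p.1 := by
    intro p hp
    obtain ⟨w, _, hpw⟩ := List.mem_map.mp ((hmem p).mp hp)
    rw [← hpw]; exact wlp_len_nonneg w
  have hz : ∀ p ∈ s, p.2 = 0 → p.1 = 0 := by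
    intro p hp h0
    obtain ⟨w, _, hpw⟩ := List.mem_map.mp ((hmem p).mp hp)
    subst hpw
    have : w.toList = [] := wlpMask_eq_zero _ h0
    simp [wlpRec, PySem.Str.len_eq, this]
  have hdesc : s.Pairwise (fun a b => b.1 ≤ a.1) := by
    rw [hs]
    exact PySem.List.sorted_pairwise_rev _ _
  rw [wlp_scan_eq s 0 le_rfl hnn hz hdesc, wlp_m0_eq words s hmem]
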